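-- pv_equiv track=rewrite | github.com/Oldwolfster/neural_network_arena | src/NNA/engine/Utils.py | beautify_text
-- ===== SOURCE A (Python) =====
-- def beautify_text(text: str) -> str:
--     """
--     Turn things_likeThis_andThat into:
--       'Things Like This And That'
--     """
--     # First pass: mark every position where we need a space
--     breaks = [False] * len(text)
--     for i in range(1, len(text)):
--         if text[i] == "_":
--             breaks[i] = True
--         elif text[i].isupper() and text[i-1].islower():
--             breaks[i] = True
--
--     out = []
--     new_word = True
--     for i, ch in enumerate(text):
--         if ch == "_":
--             out.append(" ")
--             new_word = True
--             continue
--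
--         if breaks[i]:
--             out.append(" ")
--             new_word = True
--
--         # Title-case logic
--         if new_word:
--             out.append(ch.upper())
--         else:
--             out.append(ch.lower())
--         new_word = False
--
--     return "".join(out)
-- ===== SOURCE B (Python) =====
-- def beautify_text(text: str) -> str:
--     """
--     Turn things_likeThis_andThat into:
--       'Things Like This And That'
--     """
--     # Single scan: split into word tokens (possibly empty, so runs of
--     # underscores keep their spaces), then title-case each and join.
--     words = []
--     buf = []
--     prev = None
--     for ch in text:
--         if ch == "_":
--             words.append(buf)
--             buf = []
--         else:
--             if prev is not None and ch.isupper() and prev.islower():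
--                 words.append(buf)
--                 buf = []
--             buf.append(ch)
--         prev = ch
--     words.append(buf)
--     return " ".join("".join(w[:1]).upper() + "".join(w[1:]).lower() for w in words)
-- ===== Notes on version B (the rewrite author's own statement) =====
-- stated objective: simpler
-- what changed: Replaces A's two passes (a boolean breaks table over all indices, then a re-walk with a new_word flag) by one scan that tokenizes into words (keeping empty tokens at underscores) followed by a title-case-and-join of the tokens.
import Mathlib
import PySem

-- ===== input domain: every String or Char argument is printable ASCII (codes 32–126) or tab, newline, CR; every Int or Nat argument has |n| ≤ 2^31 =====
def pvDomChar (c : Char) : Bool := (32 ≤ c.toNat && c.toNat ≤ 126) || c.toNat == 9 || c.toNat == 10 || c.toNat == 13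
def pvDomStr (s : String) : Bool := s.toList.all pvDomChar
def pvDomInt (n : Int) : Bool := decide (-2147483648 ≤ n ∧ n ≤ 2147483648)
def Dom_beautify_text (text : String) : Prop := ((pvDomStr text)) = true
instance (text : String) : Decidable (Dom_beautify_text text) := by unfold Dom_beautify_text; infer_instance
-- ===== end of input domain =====

-- B replaces A's two passes (breaks table + re-walk) by one tokenizing scan
-- followed by title-case-and-join of the tokens; objective: simpler.

-- ===== PORT A =====
-- first pass: mark every position where we need a space (breaks[i] = True)
def pvBreaksStep (cs : List Char) (br : List Bool) (i : Int) : List Bool :=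
  if PySem.List.pyGetD cs i ' ' = '_' then br.set i.toNat true
  else if PySem.Chars.isupper (PySem.List.pyGetD cs i ' ') &&
          PySem.Chars.islower (PySem.List.pyGetD cs (i - 1) ' ') then br.set i.toNat true
  else br

def pvBreaks (cs : List Char) : List Bool :=
  (PySem.List.pyRange 1 (cs.length : Int)).foldl (pvBreaksStep cs) (List.replicate cs.length false)

-- second pass: body of `for i, ch in enumerate(text)` with state (out, new_word)
def pvStepA (breaks : List Bool) (st : List Char × Bool) (p : Int × Char) : List Char × Bool :=
  if p.2 = '_' then (st.1 ++ [' '], true)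
  else
    let st1 := if breaks.getD p.1.toNat false then (st.1 ++ [' '], true) else st
    if st1.2 then (st1.1 ++ [PySem.Chars.upperChar p.2], false)
    else (st1.1 ++ [PySem.Chars.lowerChar p.2], false)

def beautify_text (text : String) : String :=
  let cs := text.toList
  String.mk (((PySem.List.enumerate cs).foldl (pvStepA (pvBreaks cs)) ([], true)).1)

-- ===== PORT B =====
-- w[:1].upper() + w[1:].lower()
def pvTitle (w : List Char) : List Char :=
  PySem.Chars.upper (PySem.List.slice w none (some 1)) ++
  PySem.Chars.lower (PySem.List.slice w (some 1) none)

-- the tokenizing loop: words / buf / prev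
def pvTokenize (words : List (List Char)) (buf : List Char) (prev : Option Char) :
    List Char → List (List Char)
  | [] => words ++ [buf]
  | ch :: rest =>
    if ch = '_' then pvTokenize (words ++ [buf]) [] (some ch) rest
    else if (match prev with
             | some p => PySem.Chars.isupper ch && PySem.Chars.islower p
             | none => false) then
      pvTokenize (words ++ [buf]) [ch] (some ch) rest
    else pvTokenize words (buf ++ [ch]) (some ch) rest

def beautify_text_alt (text : String) : String :=
  String.mk (PySem.Chars.join [' '] ((pvTokenize [] [] none text.toList).map pvTitle))

-- ===== PRECONDITION & SPEC =====
def Spec_beautify_text (text : String) (out : String) : Prop := out = beautify_text_alt text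
instance (text : String) (out : String) : Decidable (Spec_beautify_text text out) := by unfold Spec_beautify_text; infer_instance

-- ===== CLAIM (what is proved, stated in full; the proofs are below) =====
def Claim_equal_beautify_text : Prop := ∀ (text : String), Dom_beautify_text text → Spec_beautify_text text (beautify_text text)

-- ===== LEMMAS AND PROOFS =====

-- the break condition in terms of the previous and current character
def pvBrk (p c : Char) : Bool :=
  (c = '_') || (PySem.Chars.isupper c && PySem.Chars.islower p)

theorem pvBreaksStep_length (cs : List Char) (br : List Bool) (i : Int) :
    (pvBreaksStep cs br i).length = br.length := by
  unfold pvBreaksStep; split_ifs <;> simp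

theorem pvBreaks_fold (cs : List Char) : ∀ (fuel a : Nat), cs.length - a ≤ fuel → 1 ≤ a →
    ∀ (br : List Bool), br.length = cs.length → ∀ i : Nat, i < cs.length →
    ((PySem.List.pyRange (a : Int) (cs.length : Int)).foldl (pvBreaksStep cs) br).getD i false
      = if a ≤ i ∧ pvBrk (cs.getD (i - 1) ' ') (cs.getD i ' ') = true then true
        else br.getD i false := by
  intro fuel
  induction fuel with
  | zero =>
    intro a hfuel ha br hbr i hi
    have hge : cs.length ≤ a := by omega
    have hempty : PySem.List.pyRange (a : Int) (cs.length : Int) = [] :=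
      PySem.List.pyRange_one_eq_nil (by exact_mod_cast hge)
    rw [hempty]
    simp only [List.foldl_nil]
    have : ¬ (a ≤ i) := by omega
    simp [this]
  | succ fuel ih =>
    intro a hfuel ha br hbr i hi
    by_cases hlt : a < cs.length
    · have hcons : PySem.List.pyRange (a : Int) (cs.length : Int)
          = (a : Int) :: PySem.List.pyRange ((a : Int) + 1) (cs.length : Int) := by
        exact PySem.List.pyRange_one_cons (by exact_mod_cast hlt)
      rw [hcons, List.foldl_cons]
      have hcast : ((a : Int) + 1) = (((a + 1 : Nat)) : Int) := by push_cast; ring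
      rw [hcast]
      have hbr' : (pvBreaksStep cs br (a : Int)).length = cs.length := by
        rw [pvBreaksStep_length]; exact hbr
      rw [ih (a + 1) (by omega) (by omega) _ hbr' i hi]
      -- relate the one-step update values
      have hstep : (pvBreaksStep cs br (a : Int)).getD i false
          = if a = i ∧ pvBrk (cs.getD (i - 1) ' ') (cs.getD i ' ') = true then true
            else br.getD i false := by
        unfold pvBreaksStep
        have hga : PySem.List.pyGetD cs (a : Int) ' ' = cs.getD a ' ' := by
          simp [pysem]
        have hga' : PySem.List.pyGetD cs ((a : Int) - 1) ' ' = cs.getD (a - 1) ' ' := by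
          have : ((a : Int) - 1) = (((a - 1 : Nat)) : Int) := by omega
          rw [this]; simp [pysem]
        have htn : (a : Int).toNat = a := by omega
        rw [hga, hga', htn]
        have hset_eq : ∀ h : a = i, (br.set a true).getD i false = true := by
          intro h; subst h; simp [List.getD, hbr ▸ hlt]
        have hset_ne : ∀ h : a ≠ i, (br.set a true).getD i false = br.getD i false := by
          intro h; simp [List.getD, List.getElem?_set_ne h]
        by_cases hai : a = i
        · subst hai
          simp only [eq_self_iff_true, true_and]
          by_cases h1 : cs.getD a ' ' = '_'
          · have hbk : pvBrk (cs.getD (a - 1) ' ') (cs.getD a ' ') = true := by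
              simp only [pvBrk, Bool.or_eq_true, decide_eq_true_eq]; left; exact h1
            rw [if_pos h1, if_pos hbk, hset_eq rfl]
          · rw [if_neg h1]
            by_cases h2 : (PySem.Chars.isupper (cs.getD a ' ') &&
                PySem.Chars.islower (cs.getD (a - 1) ' ')) = true
            · have hbk : pvBrk (cs.getD (a - 1) ' ') (cs.getD a ' ') = true := by
                simp only [pvBrk, Bool.or_eq_true]; right; exact h2
              rw [if_pos h2, if_pos hbk, hset_eq rfl]
            · have hbk : ¬ pvBrk (cs.getD (a - 1) ' ') (cs.getD a ' ') = true := by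
                simp only [pvBrk, Bool.or_eq_true, decide_eq_true_eq]
                rintro (h | h)
                · exact h1 h
                · exact h2 h
              rw [if_neg h2, if_neg hbk]
        · have hne := hset_ne hai
          have hno : ¬ (a = i ∧ pvBrk (cs.getD (i - 1) ' ') (cs.getD i ' ') = true) := by tauto
          rw [if_neg hno]
          split_ifs with u v
          · exact hne
          · exact hne
          · rfl
      rw [hstep]
      by_cases hc : pvBrk (cs.getD (i - 1) ' ') (cs.getD i ' ') = true
      · simp only [hc, and_true]
        by_cases hai : a = i
        · have h1 : ¬ (a + 1 ≤ i) := by omega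
          have h2 : a ≤ i := by omega
          simp [hai, h1, h2]
        · by_cases hle : a ≤ i
          · have h1 : a + 1 ≤ i := by omega
            simp [h1, hle]
          · have h1 : ¬ (a + 1 ≤ i) := by omega
            simp [h1, hle, hai]
      · simp only [Bool.not_eq_true] at hc
        rw [hc]
        simp
    · have hempty : PySem.List.pyRange (a : Int) (cs.length : Int) = [] :=
        PySem.List.pyRange_one_eq_nil (by exact_mod_cast (by omega : cs.length ≤ a))
      rw [hempty]
      simp only [List.foldl_nil]
      have : ¬ (a ≤ i) := by omega
      simp [this]

theorem pvBreaks_getD (cs : List Char) (i : Nat) (hi : i < cs.length) :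
    (pvBreaks cs).getD i false
      = if 1 ≤ i then pvBrk (cs.getD (i - 1) ' ') (cs.getD i ' ') else false := by
  unfold pvBreaks
  have h := pvBreaks_fold cs cs.length 1 (by omega) (le_refl 1)
    (List.replicate cs.length false) (by simp) i hi
  simp only [Nat.cast_one] at h
  rw [h]
  have hrep : (List.replicate cs.length false).getD i false = false := by
    simp [List.getD, List.getElem?_replicate, hi]
  by_cases h1 : 1 ≤ i
  · rw [if_pos h1]
    by_cases hc : pvBrk (cs.getD (i - 1) ' ') (cs.getD i ' ') = true
    · rw [if_pos ⟨h1, hc⟩, hc]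
    · rw [if_neg (by tauto), hrep]
      simp only [Bool.not_eq_true] at hc
      exact hc.symm
  · rw [if_neg h1, if_neg (by tauto), hrep]

-- pvTitle in take/drop form
theorem pvTitle_eq (w : List Char) :
    pvTitle w = PySem.Chars.upper (w.take 1) ++ PySem.Chars.lower (w.drop 1) := by
  unfold pvTitle
  rw [PySem.List.slice_to w (by norm_num), PySem.List.slice_from w (by norm_num)]
  norm_num

-- title of a one-longer buffer
theorem pvTitle_snoc (buf : List Char) (ch : Char) :
    pvTitle (buf ++ [ch])
      = pvTitle buf ++ [if buf = [] then PySem.Chars.upperChar ch else PySem.Chars.lowerChar ch] := by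
  cases buf with
  | nil => simp [pvTitle_eq, PySem.Chars.upper, PySem.Chars.lower]
  | cons b bs =>
    simp [pvTitle_eq, PySem.Chars.upper, PySem.Chars.lower]

-- join of at least two pieces
theorem pvJoin_cons_cons (s a b : List Char) (u : List (List Char)) :
    PySem.Chars.join s (a :: b :: u) = a ++ s ++ PySem.Chars.join s (b :: u) := by
  simp [PySem.Chars.join, List.intercalate, List.intersperse]

-- join with separator, one more (possibly growing) last piece
theorem join_snoc (s : List Char) (l : List (List Char)) (w : List Char) (hl : l ≠ []) :
    PySem.Chars.join s (l ++ [w]) = PySem.Chars.join s l ++ s ++ w := by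
  induction l with
  | nil => exact absurd rfl hl
  | cons a t ih =>
    cases t with
    | nil => simp [PySem.Chars.join, List.intercalate, List.intersperse]
    | cons b u =>
      simp only [List.cons_append]
      rw [pvJoin_cons_cons, pvJoin_cons_cons]
      rw [show (b :: (u ++ [w])) = (b :: u) ++ [w] from rfl, ih (by simp)]
      simp [List.append_assoc]

theorem join_last_append (s : List Char) (l : List (List Char)) (w x : List Char) :
    PySem.Chars.join s (l ++ [w ++ x]) = PySem.Chars.join s (l ++ [w]) ++ x := by
  induction l with
  | nil => simp [PySem.Chars.join, List.intercalate]
  | cons a t ih =>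
    cases t with
    | nil => simp [PySem.Chars.join, List.intercalate, List.intersperse, List.append_assoc]
    | cons b u =>
      simp only [List.cons_append]
      rw [pvJoin_cons_cons, pvJoin_cons_cons]
      rw [show (b :: (u ++ [w ++ x])) = (b :: u) ++ [w ++ x] from rfl,
          show (b :: (u ++ [w])) = (b :: u) ++ [w] from rfl, ih]
      simp [List.append_assoc]

-- the main loop correspondence
theorem pvMainLoop (cs : List Char) : ∀ (rest : List Char) (k : Nat),
    rest = cs.drop k →
    ∀ (out buf : List Char) (words : List (List Char)) (nw : Bool) (prev : Option Char),
    nw = buf.isEmpty →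
    out = PySem.Chars.join [' '] ((words ++ [buf]).map pvTitle) →
    prev = (if k = 0 then none else some (cs.getD (k - 1) ' ')) →
    ((PySem.List.enumerate rest (k : Int)).foldl (pvStepA (pvBreaks cs)) (out, nw)).1
      = PySem.Chars.join [' '] ((pvTokenize words buf prev rest).map pvTitle) := by
  intro rest
  induction rest with
  | nil =>
    intro k hrest out buf words nw prev hnw hout hprev
    simp [PySem.List.enumerate, pvTokenize, hout]
  | cons ch rest ih =>
    intro k hrest out buf words nw prev hnw hout hprev
    have hk : k < cs.length := by
      by_contra h
      have : cs.drop k = [] := List.drop_eq_nil_of_le (by omega)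
      rw [this] at hrest; exact absurd hrest (by simp)
    have hch : cs.getD k ' ' = ch := by
      have h0 : (cs.drop k)[0]? = some ch := by rw [← hrest]; rfl
      rw [List.getElem?_drop] at h0
      simp only [Nat.add_zero] at h0
      simp [List.getD, h0]
    have hrest' : rest = cs.drop (k + 1) := by
      have h1 : cs.drop (k + 1) = (cs.drop k).drop 1 := by
        rw [List.drop_drop]
      rw [h1, ← hrest]
      simp
    have henum : PySem.List.enumerate (ch :: rest) (k : Int)
        = ((k : Int), ch) :: PySem.List.enumerate rest ((k : Int) + 1) := rfl
    have hcast : ((k : Int) + 1) = (((k + 1 : Nat)) : Int) := by push_cast; ring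
    rw [henum, List.foldl_cons, hcast]
    -- the join-extension goal shared by the two word-pushing branches
    have houtgrow : ∀ w : List Char,
        out ++ [' '] ++ pvTitle w
          = PySem.Chars.join [' '] (List.map pvTitle (words ++ [buf] ++ [w])) := by
      intro w
      rw [hout]
      have h := join_snoc [' '] (List.map pvTitle (words ++ [buf])) (pvTitle w) (by simp)
      simp only [List.map_append, List.map_cons, List.map_nil, List.append_assoc] at h ⊢
      rw [h]
    have hprev' : some ch = (if k + 1 = 0 then none
        else some (cs.getD (k + 1 - 1) ' ')) := by
      rw [if_neg (Nat.succ_ne_zero k), Nat.add_sub_cancel, hch]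
    by_cases hund : ch = '_'
    · -- underscore: emit a space, push the buffer
      have hstep : pvStepA (pvBreaks cs) (out, nw) ((k : Int), ch) = (out ++ [' '], true) := by
        simp [pvStepA, hund]
      rw [hstep]
      have htok : pvTokenize words buf prev (ch :: rest)
          = pvTokenize (words ++ [buf]) [] (some ch) rest := by
        simp [pvTokenize, hund]
      rw [htok]
      apply ih (k + 1) hrest'
      · simp
      · have h := houtgrow []
        rw [show pvTitle [] = [] from by simp [pvTitle_eq, PySem.Chars.upper, PySem.Chars.lower]]
          at h
        simpa using h
      · exact hprev'
    · -- not an underscore: the break table decides between new word and same word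
      cases prev with
      | none =>
        have hk0 : k = 0 := by
          by_contra h0
          rw [if_neg h0] at hprev
          simp at hprev
        have hbrk : (pvBreaks cs).getD ((k : Int)).toNat false = false := by
          have htn : ((k : Int)).toNat = k := by omega
          rw [htn, pvBreaks_getD cs k hk]
          simp [hk0]
        have hbrkE : (pvBreaks cs)[k]?.getD false = false := by
          simpa [List.getD] using hbrk
        have hstep : pvStepA (pvBreaks cs) (out, nw) ((k : Int), ch)
            = (out ++ [if buf = [] then PySem.Chars.upperChar ch
                       else PySem.Chars.lowerChar ch], false) := by
          cases buf with
          | nil =>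
            have hnw' : nw = true := by simpa using hnw
            simp [pvStepA, hbrkE, hund, hnw']
          | cons b bs =>
            have hnw' : nw = false := by simpa using hnw
            simp [pvStepA, hbrkE, hund, hnw']
        rw [hstep]
        have htok : pvTokenize words buf none (ch :: rest)
            = pvTokenize words (buf ++ [ch]) (some ch) rest := by
          simp [pvTokenize, hund]
        rw [htok]
        apply ih (k + 1) hrest'
        · simp
        · rw [hout]
          simp only [List.map_append, List.map_cons, List.map_nil]
          rw [pvTitle_snoc]
          exact (join_last_append [' '] (words.map pvTitle) (pvTitle buf) _).symm
        · exact hprev'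
      | some p =>
        have hk0 : k ≠ 0 := by
          intro h0
          rw [if_pos h0] at hprev
          simp at hprev
        have hp : p = cs.getD (k - 1) ' ' := by
          rw [if_neg hk0] at hprev
          exact Option.some.inj hprev
        have hbrk : (pvBreaks cs).getD ((k : Int)).toNat false = pvBrk p ch := by
          have htn : ((k : Int)).toNat = k := by omega
          rw [htn, pvBreaks_getD cs k hk, if_pos (by omega : 1 ≤ k), ← hp, hch]
        by_cases hbk : (PySem.Chars.isupper ch && PySem.Chars.islower p) = true
        · -- camelCase break: emit a space, start a new word with ch
          have hbrk' : pvBrk p ch = true := by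
            simp only [pvBrk, Bool.or_eq_true]
            right; exact hbk
          have hbrkE : (pvBreaks cs)[k]?.getD false = true := by
            simpa [List.getD] using hbrk.trans hbrk'
          have hstep : pvStepA (pvBreaks cs) (out, nw) ((k : Int), ch)
              = (out ++ [' '] ++ [PySem.Chars.upperChar ch], false) := by
            simp [pvStepA, hbrkE, hund]
          rw [hstep]
          have htok : pvTokenize words buf (some p) (ch :: rest)
              = pvTokenize (words ++ [buf]) [ch] (some ch) rest := by
            simp only [pvTokenize]
            rw [if_neg hund, if_pos hbk]
          rw [htok]
          apply ih (k + 1) hrest'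
          · simp
          · have h := houtgrow [ch]
            rw [show pvTitle [ch] = [PySem.Chars.upperChar ch] from by
                  simp [pvTitle_eq, PySem.Chars.upper, PySem.Chars.lower]] at h
            exact h
          · exact hprev'
        · -- plain character: append to the current word
          have hbrk' : pvBrk p ch = false := by
            simp only [pvBrk, Bool.or_eq_false_iff, decide_eq_false_iff_not]
            exact ⟨hund, by simpa using hbk⟩
          have hbrkE : (pvBreaks cs)[k]?.getD false = false := by
            simpa [List.getD] using hbrk.trans hbrk'
          have hstep : pvStepA (pvBreaks cs) (out, nw) ((k : Int), ch)
              = (out ++ [if buf = [] then PySem.Chars.upperChar ch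
                         else PySem.Chars.lowerChar ch], false) := by
            cases buf with
            | nil =>
              have hnw' : nw = true := by simpa using hnw
              simp [pvStepA, hbrkE, hund, hnw']
            | cons b bs =>
              have hnw' : nw = false := by simpa using hnw
              simp [pvStepA, hbrkE, hund, hnw']
          rw [hstep]
          have htok : pvTokenize words buf (some p) (ch :: rest)
              = pvTokenize words (buf ++ [ch]) (some ch) rest := by
            simp only [pvTokenize]
            rw [if_neg hund, if_neg (by simpa using hbk)]
          rw [htok]
          apply ih (k + 1) hrest'
          · simp
          · rw [hout]
            simp only [List.map_append, List.map_cons, List.map_nil]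
            rw [pvTitle_snoc]
            exact (join_last_append [' '] (words.map pvTitle) (pvTitle buf) _).symm
          · exact hprev'


-- ===== VERDICT (by name: the statement is the Claim_ definition above) =====
theorem beautify_text_spec : Claim_equal_beautify_text := by
  intro text _
  unfold Spec_beautify_text beautify_text beautify_text_alt
  have h := pvMainLoop text.toList text.toList 0 (by simp) [] [] [] true none rfl
    (by simp [pvTitle_eq, PySem.Chars.join, List.intercalate, PySem.Chars.upper, PySem.Chars.lower]) rfl
  simp only [Nat.cast_zero] at h
  exact congrArg String.mk h
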